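-- pv_equiv track=rewrite | github.com/bica-tools/reticulate | reticulate/automorphism.py | _precompute_meet_table
-- ===== SOURCE A (Python) =====
-- def _precompute_meet_table(reach: dict[int, set[int]],
--                            nodes: list[int]) -> dict[tuple[int, int], int | None]:
--     """Precompute full meet table for O(1) lookups."""
--     table: dict[tuple[int, int], int | None] = {}
--     for a in nodes:
--         for b in nodes:
--             if a == b:
--                 table[(a, b)] = a
--                 continue
--             lower = [n for n in nodes if n in reach[a] and n in reach[b]]
--             meet = None
--             for c in lower:
--                 if all(lb in reach[c] or lb == c for lb in lower):
--                     meet = c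
--                     break
--             table[(a, b)] = meet
--     return table
-- ===== SOURCE B (Python) =====
-- def _precompute_meet_table(reach, nodes):
--     """Meet table by online candidate pruning: for each pair, a single pass over
--     nodes maintains the ordered list of elements that dominate every common
--     lower bound seen so far; the survivors' head is the meet."""
--     table = {}
--     for a in nodes:
--         for b in nodes:
--             if a == b:
--                 table[(a, b)] = a
--                 continue
--             ra = reach[a]
--             rb = reach[b]
--             cands = []   # candidates still dominating all lower bounds seen
--             seen = []    # common lower bounds seen so far
--             for n in nodes:
--                 if n in ra and n in rb:
--                     cands = [c for c in cands if n in reach[c] or n == c]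
--                     if all(m in reach[n] or m == n for m in seen):
--                         cands.append(n)
--                     seen.append(n)
--             table[(a, b)] = cands[0] if cands else None
--     return table
-- ===== Notes on version B (the rewrite author's own statement) =====
-- stated objective: alternative
-- what changed: B replaces A's two staged passes per pair (build the common-lower list, then rescan it testing each candidate against the whole list) by a single online pass over nodes that maintains the ordered set of candidates still dominating every common lower bound seen so far, pruning candidates as new lower bounds arrive; the head of the surviving candidates is the meet.
import Mathlib
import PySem

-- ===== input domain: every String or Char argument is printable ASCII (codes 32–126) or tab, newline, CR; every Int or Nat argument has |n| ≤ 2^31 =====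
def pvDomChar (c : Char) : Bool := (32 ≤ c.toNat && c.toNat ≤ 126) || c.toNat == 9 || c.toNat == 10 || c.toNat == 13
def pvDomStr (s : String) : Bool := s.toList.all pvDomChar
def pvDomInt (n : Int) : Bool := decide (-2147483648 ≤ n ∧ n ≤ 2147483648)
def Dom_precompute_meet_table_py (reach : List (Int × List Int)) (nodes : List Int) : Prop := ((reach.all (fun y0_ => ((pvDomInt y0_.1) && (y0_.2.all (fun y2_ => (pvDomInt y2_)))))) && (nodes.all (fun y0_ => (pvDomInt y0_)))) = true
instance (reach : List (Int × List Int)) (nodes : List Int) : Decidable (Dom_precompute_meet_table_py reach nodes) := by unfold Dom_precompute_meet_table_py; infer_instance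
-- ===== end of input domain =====

-- B computes each pair's meet in one online pass that prunes a candidate list as
-- common lower bounds arrive, instead of A's build-lower-list-then-rescan; values equal.

-- ===== PORT A =====
-- lower = [n for n in nodes if n in reach[a] and n in reach[b]]
-- (reach[x] is ported as getD with default []; Pre_ excludes the KeyError inputs)
def pmtLowerA (d : PySem.Dict Int (List Int)) (nodes : List Int) (a b : Int) : List Int :=
  nodes.filter (fun n => (d.getD a []).contains n && (d.getD b []).contains n)

-- meet = None; for c in lower: if all(lb in reach[c] or lb == c for lb in lower): meet = c; break
def pmtScanA (d : PySem.Dict Int (List Int)) (lower : List Int) : Option Int :=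
  lower.find? (fun c => lower.all (fun lb => (d.getD c []).contains lb || lb == c))

def pmtStepA (d : PySem.Dict Int (List Int)) (nodes : List Int) (a : Int)
    (table : PySem.Dict (Int × Int) (Option Int)) (b : Int) : PySem.Dict (Int × Int) (Option Int) :=
  if a == b then table.insert (a, b) (some a)
  else table.insert (a, b) (pmtScanA d (pmtLowerA d nodes a b))

def precompute_meet_table_py (reach : List (Int × List Int)) (nodes : List Int) : List (Int × Int × Option Int) :=
  let d := PySem.Dict.mk reach
  let table := nodes.foldl (fun table a => nodes.foldl (pmtStepA d nodes a) table) PySem.Dict.empty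
  table.items.map (fun kv => (kv.1.1, kv.1.2, kv.2))

-- ===== PORT B =====
-- the inner pass body: state (cands, seen); on a common lower bound n,
-- cands = [c for c in cands if n in reach[c] or n == c];
-- if all(m in reach[n] or m == n for m in seen): cands.append(n); seen.append(n)
def pmtPassB (d : PySem.Dict Int (List Int)) (ra rb : List Int)
    (st : List Int × List Int) (n : Int) : List Int × List Int :=
  if ra.contains n && rb.contains n then
    let cands := st.1.filter (fun c => (d.getD c []).contains n || n == c)
    let cands := if st.2.all (fun m => (d.getD n []).contains m || m == n) then cands ++ [n] else cands
    (cands, st.2 ++ [n])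
  else st

-- table[(a,b)] = cands[0] if cands else None
def pmtPairB (d : PySem.Dict Int (List Int)) (nodes : List Int) (a b : Int) : Option Int :=
  let ra := d.getD a []
  let rb := d.getD b []
  (nodes.foldl (pmtPassB d ra rb) ([], [])).1.head?

def pmtStepB (d : PySem.Dict Int (List Int)) (nodes : List Int) (a : Int)
    (table : PySem.Dict (Int × Int) (Option Int)) (b : Int) : PySem.Dict (Int × Int) (Option Int) :=
  if a == b then table.insert (a, b) (some a)
  else table.insert (a, b) (pmtPairB d nodes a b)

def precompute_meet_table_py_alt (reach : List (Int × List Int)) (nodes : List Int) : List (Int × Int × Option Int) :=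
  let d := PySem.Dict.mk reach
  let table := nodes.foldl (fun table a => nodes.foldl (pmtStepB d nodes a) table) PySem.Dict.empty
  table.items.map (fun kv => (kv.1.1, kv.1.2, kv.2))

-- ===== PRECONDITION & SPEC =====
-- Pre_ excludes exactly the KeyError inputs: A raises iff nodes contains two distinct
-- values and some node is not a key of reach.
def Pre_precompute_meet_table_py (reach : List (Int × List Int)) (nodes : List Int) : Prop :=
  (∀ n ∈ nodes, ∀ m ∈ nodes, n = m) ∨ (∀ n ∈ nodes, n ∈ reach.map (·.1))
instance (reach : List (Int × List Int)) (nodes : List Int) : Decidable (Pre_precompute_meet_table_py reach nodes) := by unfold Pre_precompute_meet_table_py; infer_instance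

def pvWitness_precompute_meet_table_py : (List (Int × List Int)) × List Int :=
  ([(1, [2]), (2, []), (3, [1, 2])], [1, 2, 3])

def Spec_precompute_meet_table_py (reach : List (Int × List Int)) (nodes : List Int) (out : List (Int × Int × Option Int)) : Prop := out = precompute_meet_table_py_alt reach nodes
instance (reach : List (Int × List Int)) (nodes : List Int) (out : List (Int × Int × Option Int)) : Decidable (Spec_precompute_meet_table_py reach nodes out) := by unfold Spec_precompute_meet_table_py; infer_instance

-- ===== CLAIM (what is proved, stated in full; the proofs are below) =====
def Claim_equal_precompute_meet_table_py : Prop := ∀ (reach : List (Int × List Int)) (nodes : List Int), Dom_precompute_meet_table_py reach nodes → Pre_precompute_meet_table_py reach nodes → Spec_precompute_meet_table_py reach nodes (precompute_meet_table_py reach nodes)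

-- ===== LEMMAS AND PROOFS =====

-- A's dominance predicate over a list L
def pmtDom (d : PySem.Dict Int (List Int)) (L : List Int) (c : Int) : Bool :=
  L.all (fun lb => (d.getD c []).contains lb || lb == c)

lemma pmt_find?_eq_head?_filter {α : Type} (p : α → Bool) (l : List α) :
    l.find? p = (l.filter p).head? := by
  induction l with
  | nil => rfl
  | cons x xs ih =>
    by_cases h : p x = true
    · rw [List.find?_cons_of_pos h, List.filter_cons_of_pos h, List.head?_cons]
    · rw [List.find?_cons_of_neg (by simp [h]), List.filter_cons_of_neg (by simp [h]), ih]

-- one pruning step preserves "cands = filter of dominators"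
lemma pmtDom_snoc (d : PySem.Dict Int (List Int)) (S : List Int) (n : Int) :
    (S ++ [n]).filter (pmtDom d (S ++ [n])) =
      (S.filter (pmtDom d S)).filter (fun c => (d.getD c []).contains n || n == c) ++
        (if S.all (fun m => (d.getD n []).contains m || m == n) then [n] else []) := by
  rw [List.filter_append, List.filter_filter]
  congr 1
  · apply List.filter_congr
    intro c _
    unfold pmtDom
    rw [List.all_append, List.all_cons, List.all_nil, Bool.and_true, Bool.and_comm]
  · unfold pmtDom
    simp only [List.filter_cons, List.filter_nil, List.all_append, List.all_cons, List.all_nil,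
      beq_self_eq_true, Bool.or_true, Bool.and_true]

-- the loop invariant: starting from (filter of dominators of S, S), the pass over xs
-- yields the same shape for S extended by the common lower bounds among xs
lemma pmtPassB_invariant (d : PySem.Dict Int (List Int)) (ra rb : List Int)
    (xs : List Int) (S : List Int) :
    xs.foldl (pmtPassB d ra rb) (S.filter (pmtDom d S), S) =
      ((S ++ xs.filter (fun n => ra.contains n && rb.contains n)).filter
        (pmtDom d (S ++ xs.filter (fun n => ra.contains n && rb.contains n))),
       S ++ xs.filter (fun n => ra.contains n && rb.contains n)) := by
  induction xs generalizing S with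
  | nil => simp
  | cons n xs ih =>
    rw [List.foldl_cons, List.filter_cons]
    by_cases h : (ra.contains n && rb.contains n) = true
    · rw [if_pos h]
      have hstep : pmtPassB d ra rb (S.filter (pmtDom d S), S) n =
          ((S ++ [n]).filter (pmtDom d (S ++ [n])), S ++ [n]) := by
        unfold pmtPassB
        rw [if_pos h, pmtDom_snoc]
        dsimp only
        split <;> simp
      rw [hstep, ih (S ++ [n]), List.append_assoc]
      rfl
    · simp only [Bool.not_eq_true] at h
      have hstep : pmtPassB d ra rb (S.filter (pmtDom d S), S) n = (S.filter (pmtDom d S), S) := by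
        unfold pmtPassB
        rw [h]
        simp only [Bool.false_eq_true, if_false]
      rw [hstep, h]
      simp only [Bool.false_eq_true, if_false]
      exact ih S

lemma pmtPairB_eq (d : PySem.Dict Int (List Int)) (nodes : List Int) (a b : Int) :
    pmtPairB d nodes a b = pmtScanA d (pmtLowerA d nodes a b) := by
  have h := pmtPassB_invariant d (d.getD a []) (d.getD b []) nodes []
  simp only [List.filter_nil, List.nil_append] at h
  unfold pmtPairB pmtScanA pmtLowerA
  show (nodes.foldl (pmtPassB d (d.getD a []) (d.getD b [])) ([], [])).1.head? = _
  rw [h, pmt_find?_eq_head?_filter]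
  rfl

lemma pmtStepB_eq (d : PySem.Dict Int (List Int)) (nodes : List Int) (a : Int)
    (table : PySem.Dict (Int × Int) (Option Int)) (b : Int) :
    pmtStepB d nodes a table b = pmtStepA d nodes a table b := by
  unfold pmtStepB pmtStepA
  rw [pmtPairB_eq]

-- ===== VERDICT (by name: the statement is the Claim_ definition above) =====
theorem precompute_meet_table_py_spec : Claim_equal_precompute_meet_table_py := by
  intro reach nodes _ _
  have hstep : pmtStepB (PySem.Dict.mk reach) nodes = pmtStepA (PySem.Dict.mk reach) nodes := by
    funext a table b
    exact pmtStepB_eq _ _ _ _ _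
  unfold Spec_precompute_meet_table_py precompute_meet_table_py precompute_meet_table_py_alt
  show (nodes.foldl (fun table a => nodes.foldl (pmtStepA (PySem.Dict.mk reach) nodes a) table)
      PySem.Dict.empty).items.map (fun kv => (kv.1.1, kv.1.2, kv.2)) =
    (nodes.foldl (fun table a => nodes.foldl (pmtStepB (PySem.Dict.mk reach) nodes a) table)
      PySem.Dict.empty).items.map (fun kv => (kv.1.1, kv.1.2, kv.2))
  rw [hstep]
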